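-- pv_equiv track=rewrite | github.com/yutsang/yuutraffic | src/yuutraffic/precompute.py | _n_api_calls
-- ===== SOURCE A (Python) =====
-- def _n_api_calls(coords: list, batch: int = 8) -> int:
--     """Number of OSRM API calls needed for this route."""
--     if len(coords) <= batch:
--         return 1
--     n = 0
--     i = 0
--     while i < len(coords) - 1:
--         end = min(i + batch, len(coords))
--         n += 1
--         i = end - 1
--     return n
-- ===== SOURCE B (Python) =====
-- def _n_api_calls(coords: list, batch: int = 8) -> int:
--     """Number of OSRM API calls needed for this route."""
--     if len(coords) <= batch:
--         return 1
--     return (len(coords) - 2) // (batch - 1) + 1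
-- ===== Notes on version B (the rewrite author's own statement) =====
-- stated objective: simpler
-- what changed: Replaced the batch-stepping while loop with the closed form ceil((len-1)/(batch-1)) computed as (len-2)//(batch-1)+1; Pre_ excludes batch<=1 with len(coords)>batch, where A's while loop never terminates (len>=2) or, on at most one coordinate with a nonsensical non-positive batch, degenerately returns 0 while B's closed form divides by batch-1.
-- outside the precondition, e.g. on _n_api_calls([], -9834): A returns 0, B returns 1; on _n_api_calls([3], 0): A returns 0, B returns 2; on _n_api_calls([3, 4], 1): A does not finish within the time limit, B raises ZeroDivisionError
import Mathlib
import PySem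

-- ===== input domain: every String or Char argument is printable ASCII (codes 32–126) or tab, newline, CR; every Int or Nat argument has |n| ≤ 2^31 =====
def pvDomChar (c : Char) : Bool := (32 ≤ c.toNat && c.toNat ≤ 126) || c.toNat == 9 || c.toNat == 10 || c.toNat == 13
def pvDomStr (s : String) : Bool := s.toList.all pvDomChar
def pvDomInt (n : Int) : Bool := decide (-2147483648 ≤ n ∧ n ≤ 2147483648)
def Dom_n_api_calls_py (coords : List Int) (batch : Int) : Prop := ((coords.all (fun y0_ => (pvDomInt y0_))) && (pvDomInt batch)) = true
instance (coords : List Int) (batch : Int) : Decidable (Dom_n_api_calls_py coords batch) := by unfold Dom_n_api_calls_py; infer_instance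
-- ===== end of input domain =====

-- B replaces A's batch-stepping while loop with the closed form ceil((len-1)/(batch-1)): simpler, loop-free.

-- ===== PORT A =====
-- the while loop of A, with fuel: inside Pre_ (batch ≥ 2) at most coords.length iterations run,
-- so fuel coords.length makes the port exact there (A never terminates when batch ≤ 1 and len > batch)
def nApiLoop (L batch : Int) : Nat → Int → Int → Int
  | 0, _, n => n
  | fuel + 1, i, n =>
    if i < L - 1 then
      nApiLoop L batch fuel (min (i + batch) L - 1) (n + 1)
    else n

def n_api_calls_py (coords : List Int) (batch : Int) : Int :=
  if (coords.length : Int) ≤ batch then 1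
  else nApiLoop (coords.length : Int) batch coords.length 0 0

-- ===== PORT B =====
def n_api_calls_py_alt (coords : List Int) (batch : Int) : Int :=
  if (coords.length : Int) ≤ batch then 1
  else PySem.Int.floordiv ((coords.length : Int) - 2) (batch - 1) + 1

-- ===== PRECONDITION & SPEC =====
-- Pre_ excludes batch ≤ 1 with len(coords) > batch: there A's while loop never terminates (len ≥ 2) or, on ≤ 1 coordinates with a nonsensical non-positive batch, degenerately returns 0 while B's closed form divides by batch - 1.
def Pre_n_api_calls_py (coords : List Int) (batch : Int) : Prop :=
  (coords.length : Int) ≤ batch ∨ 2 ≤ batch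
instance (coords : List Int) (batch : Int) : Decidable (Pre_n_api_calls_py coords batch) := by unfold Pre_n_api_calls_py; infer_instance

def pvWitness_n_api_calls_py : List Int × Int := ([0, 5, 9], 2)

def Spec_n_api_calls_py (coords : List Int) (batch : Int) (out : Int) : Prop := out = n_api_calls_py_alt coords batch
instance (coords : List Int) (batch : Int) (out : Int) : Decidable (Spec_n_api_calls_py coords batch out) := by unfold Spec_n_api_calls_py; infer_instance

-- ===== CLAIM (what is proved, stated in full; the proofs are below) =====
def Claim_equal_n_api_calls_py : Prop := ∀ (coords : List Int) (batch : Int), Dom_n_api_calls_py coords batch → Pre_n_api_calls_py coords batch → Spec_n_api_calls_py coords batch (n_api_calls_py coords batch)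

-- ===== LEMMAS AND PROOFS =====

-- loop invariant: with batch ≥ 2, i strictly before the last index, and enough fuel,
-- the loop returns n + ceil((L-1-i)/(batch-1)) = n + (L-2-i)//(batch-1) + 1
theorem nApiLoop_closed (L batch : Int) (hb : 2 ≤ batch) :
    ∀ (fuel : Nat) (i n : Int), i < L - 1 → L - 1 - i ≤ (batch - 1) * fuel →
      nApiLoop L batch fuel i n = n + PySem.Int.floordiv (L - 2 - i) (batch - 1) + 1 := by
  intro fuel
  induction fuel with
  | zero => intro i n hi hf; simp at hf; omega
  | succ f ih =>
    intro i n hi hf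
    rw [nApiLoop, if_pos hi]
    by_cases hcase : i + batch < L
    · have hmin : min (i + batch) L = i + batch := by omega
      rw [hmin, ih (i + batch - 1) (n + 1) (by omega)
          (by push_cast at hf ⊢; nlinarith)]
      have hstep : PySem.Int.floordiv (L - 2 - i) (batch - 1)
          = PySem.Int.floordiv (L - 2 - (i + batch - 1)) (batch - 1) + 1 := by
        rw [PySem.Int.floordiv_eq_ediv_of_pos (by omega), PySem.Int.floordiv_eq_ediv_of_pos (by omega)]
        have : L - 2 - i = (L - 2 - (i + batch - 1)) + 1 * (batch - 1) := by ring
        rw [this, Int.add_mul_ediv_right _ _ (by omega : batch - 1 ≠ 0)]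
      omega
    · -- last chunk: next i is L - 1, loop exits with n + 1 whatever the remaining fuel
      have hmin : min (i + batch) L - 1 = L - 1 := by omega
      rw [hmin]
      have hexit : ∀ g : Nat, nApiLoop L batch g (L - 1) (n + 1) = n + 1 := by
        intro g; cases g with
        | zero => rfl
        | succ g' => rw [nApiLoop, if_neg (by omega)]
      rw [hexit]
      have h0 : PySem.Int.floordiv (L - 2 - i) (batch - 1) = 0 := by
        rw [PySem.Int.floordiv_eq_ediv_of_pos (by omega)]
        exact Int.ediv_eq_zero_of_lt (by omega) (by omega)
      omega

-- ===== VERDICT (by name: the statement is the Claim_ definition above) =====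
theorem n_api_calls_py_spec : Claim_equal_n_api_calls_py := by
  intro coords batch _ hpre
  unfold Spec_n_api_calls_py n_api_calls_py n_api_calls_py_alt
  by_cases hle : (coords.length : Int) ≤ batch
  · rw [if_pos hle, if_pos hle]
  · rw [if_neg hle, if_neg hle]
    have hb : 2 ≤ batch := by cases hpre with
      | inl h => omega
      | inr h => exact h
    have hlen : (0:Int) ≤ (coords.length : Int) := by positivity
    rw [nApiLoop_closed (coords.length : Int) batch hb coords.length 0 0 (by omega)
        (by nlinarith)]
    norm_num
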